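-- pv_equiv track=rewrite | github.com/Fattehh/BPE-for-Knowledge-Graph-Embeddings | custom_BytE_util.py | loopsplitter
-- ===== SOURCE A (Python) =====
-- def loopsplitter(loop_dict: dict[str, list[str]], outer_limit: tuple[int, int] = (100, 300)) -> (
--         dict[str, list[str]], dict[str, list[str]]):
--     runs_per_job = 1
--     outer_loop = []
--     for loop in loop_dict.items():
--         if runs_per_job > outer_limit[0] or runs_per_job * len(loop[1]) > outer_limit[1]:
--             break
--         else:
--             runs_per_job *= len(loop[1])
--             outer_loop.append(loop)
--     inner_loop = {loop[0]: loop[1] for loop in loop_dict.items() if loop not in outer_loop}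
--     outer_loop = {loop[0]: loop[1] for loop in outer_loop}
--     return outer_loop, inner_loop
-- ===== SOURCE B (Python) =====
-- def loopsplitter(loop_dict: dict[str, list[str]], outer_limit: tuple[int, int] = (100, 300)) -> (
--         dict[str, list[str]], dict[str, list[str]]):
--     outer_loop = {}
--     inner_loop = {}
--     runs_per_job = 1
--     still_outer = True
--     for k, v in loop_dict.items():
--         if still_outer and not (runs_per_job > outer_limit[0] or runs_per_job * len(v) > outer_limit[1]):
--             runs_per_job *= len(v)
--             outer_loop[k] = v
--         else:
--             still_outer = False
--             inner_loop[k] = v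
--     return outer_loop, inner_loop
-- ===== Notes on version B (the rewrite author's own statement) =====
-- stated objective: simpler
-- what changed: One partitioning pass with a still_outer flag fills both dicts directly, replacing A's break-loop plus a second full rescan doing a 'pair not in outer_loop' list-membership test per item.
import Mathlib
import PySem

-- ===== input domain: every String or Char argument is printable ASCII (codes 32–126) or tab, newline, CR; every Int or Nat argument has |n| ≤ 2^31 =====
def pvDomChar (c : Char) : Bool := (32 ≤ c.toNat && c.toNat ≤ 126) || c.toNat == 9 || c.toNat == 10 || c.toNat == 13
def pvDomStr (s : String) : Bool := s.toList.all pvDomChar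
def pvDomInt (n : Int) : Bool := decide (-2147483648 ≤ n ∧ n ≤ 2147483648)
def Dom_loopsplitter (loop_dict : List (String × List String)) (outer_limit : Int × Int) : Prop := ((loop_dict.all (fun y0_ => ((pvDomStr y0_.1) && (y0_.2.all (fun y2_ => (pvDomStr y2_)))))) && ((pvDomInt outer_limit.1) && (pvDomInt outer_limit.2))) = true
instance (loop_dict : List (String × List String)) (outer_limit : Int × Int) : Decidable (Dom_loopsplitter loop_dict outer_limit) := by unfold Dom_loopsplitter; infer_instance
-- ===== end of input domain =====

-- B does one partitioning pass filling both result dicts directly (no break, no second rescan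
-- with a membership test). Equivalence is about the return value; neither version mutates input.

-- ===== PORT A =====
-- the 'for … break' loop accumulating outer_loop while multiplying runs_per_job
def loopsplitterOuter (outer_limit : Int × Int) : List (String × List String) → Int → List (String × List String)
  | [], _ => []
  | p :: rest, runs_per_job =>
    if runs_per_job > outer_limit.1 ∨ runs_per_job * (p.2.length : Int) > outer_limit.2 then []
    else p :: loopsplitterOuter outer_limit rest (runs_per_job * (p.2.length : Int))

def loopsplitter (loop_dict : List (String × List String)) (outer_limit : Int × Int) : (List (String × List String)) × (List (String × List String)) :=
  let outer_loop := loopsplitterOuter outer_limit loop_dict 1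
  -- inner_loop = {k: v for (k,v) in items if (k,v) not in outer_loop}; the final dict
  -- comprehension over outer_loop is the identity on the Pre_ domain (distinct keys)
  let inner_loop := loop_dict.filter (fun p => decide (p ∉ outer_loop))
  (outer_loop, inner_loop)

-- ===== PORT B =====
-- single pass: state = (outer_loop, inner_loop, runs_per_job, still_outer)
def loopsplitter_alt (loop_dict : List (String × List String)) (outer_limit : Int × Int) : (List (String × List String)) × (List (String × List String)) :=
  let st := loop_dict.foldl (fun (st : List (String × List String) × List (String × List String) × Int × Bool) p =>
    if st.2.2.2 = true ∧ ¬(st.2.2.1 > outer_limit.1 ∨ st.2.2.1 * (p.2.length : Int) > outer_limit.2) then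
      (st.1 ++ [p], st.2.1, st.2.2.1 * (p.2.length : Int), true)
    else
      (st.1, st.2.1 ++ [p], st.2.2.1, false)) ([], [], 1, true)
  (st.1, st.2.1)

-- ===== PRECONDITION & SPEC =====
-- Pre_ requires pairwise-distinct keys: the association list stands for a Python dict, which
-- cannot hold duplicate keys, so on duplicate-key lists the ports' behaviour is an artefact.
def Pre_loopsplitter (loop_dict : List (String × List String)) (outer_limit : Int × Int) : Prop :=
  (loop_dict.map Prod.fst).Nodup
instance (loop_dict : List (String × List String)) (outer_limit : Int × Int) : Decidable (Pre_loopsplitter loop_dict outer_limit) := by unfold Pre_loopsplitter; infer_instance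

def pvWitness_loopsplitter : (List (String × List String)) × (Int × Int) :=
  ([("a", ["x", "y"]), ("b", ["1", "2", "3"]), ("c", ["q"])], (2, 4))

def Spec_loopsplitter (loop_dict : List (String × List String)) (outer_limit : Int × Int) (out : (List (String × List String)) × (List (String × List String))) : Prop := out = loopsplitter_alt loop_dict outer_limit
instance (loop_dict : List (String × List String)) (outer_limit : Int × Int) (out : (List (String × List String)) × (List (String × List String))) : Decidable (Spec_loopsplitter loop_dict outer_limit out) := by unfold Spec_loopsplitter; infer_instance

-- ===== CLAIM (what is proved, stated in full; the proofs are below) =====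
def Claim_equal_loopsplitter : Prop := ∀ (loop_dict : List (String × List String)) (outer_limit : Int × Int), Dom_loopsplitter loop_dict outer_limit → Pre_loopsplitter loop_dict outer_limit → Spec_loopsplitter loop_dict outer_limit (loopsplitter loop_dict outer_limit)

-- ===== LEMMAS AND PROOFS =====

-- abbreviation for B's step function
def bStep (lim : Int × Int) (st : List (String × List String) × List (String × List String) × Int × Bool) (p : String × List String) : List (String × List String) × List (String × List String) × Int × Bool :=
  if st.2.2.2 = true ∧ ¬(st.2.2.1 > lim.1 ∨ st.2.2.1 * (p.2.length : Int) > lim.2) then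
    (st.1 ++ [p], st.2.1, st.2.2.1 * (p.2.length : Int), true)
  else
    (st.1, st.2.1 ++ [p], st.2.2.1, false)

theorem alt_eq_foldl_bStep (loop_dict : List (String × List String)) (outer_limit : Int × Int) :
    loopsplitter_alt loop_dict outer_limit =
      ((loop_dict.foldl (bStep outer_limit) ([], [], 1, true)).1,
       (loop_dict.foldl (bStep outer_limit) ([], [], 1, true)).2.1) := rfl

-- once still_outer is false everything goes to inner_loop
theorem foldl_bStep_false (outer_limit : Int × Int) (ld : List (String × List String))
    (o i : List (String × List String)) (r : Int) :
    ld.foldl (bStep outer_limit) (o, i, r, false) = (o, i ++ ld, r, false) := by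
  induction ld generalizing i with
  | nil => simp
  | cons p rest ih =>
    simp only [List.foldl_cons, bStep]
    rw [if_neg (by simp)]
    simpa using ih (i ++ [p])

-- main invariant: while still_outer, B's fold produces A's outer prefix and A's filtered inner
theorem foldl_bStep_true (outer_limit : Int × Int) (ld : List (String × List String))
    (o i : List (String × List String)) (r : Int)
    (hnd : (ld.map Prod.fst).Nodup) :
    (ld.foldl (bStep outer_limit) (o, i, r, true)).1 = o ++ loopsplitterOuter outer_limit ld r ∧
    (ld.foldl (bStep outer_limit) (o, i, r, true)).2.1 =
      i ++ ld.filter (fun p => decide (p ∉ loopsplitterOuter outer_limit ld r)) := by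
  induction ld generalizing o i r with
  | nil => simp [loopsplitterOuter]
  | cons p rest ih =>
    simp only [List.map_cons, List.nodup_cons] at hnd
    obtain ⟨hk, hnd'⟩ := hnd
    by_cases hc : r > outer_limit.1 ∨ r * (p.2.length : Int) > outer_limit.2
    · -- break case: step sets still_outer := false
      simp only [List.foldl_cons, bStep, hc]
      rw [if_neg (by simp)]
      rw [loopsplitterOuter, if_pos hc]
      rw [foldl_bStep_false]
      constructor
      · simp
      · simp
    · -- continue case
      simp only [List.foldl_cons, bStep]
      rw [if_pos (by simp [hc])]
      obtain ⟨h1, h2⟩ := ih (o ++ [p]) i (r * (p.2.length : Int)) hnd'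
      rw [loopsplitterOuter, if_neg hc]
      refine ⟨by simpa using h1, ?_⟩
      rw [h2]
      congr 1
      have hpnot : p ∉ rest := fun hmem => hk (List.mem_map_of_mem hmem)
      rw [List.filter_cons, if_neg (by simp)]
      apply List.filter_congr
      intro q hq
      have hqp : q ≠ p := by
        intro h; subst h; exact hpnot hq
      simp [hqp]

theorem loopsplitter_spec : Claim_equal_loopsplitter := by
  intro ld lim _ hpre
  unfold Spec_loopsplitter
  rw [alt_eq_foldl_bStep]
  obtain ⟨h1, h2⟩ := foldl_bStep_true lim ld [] [] 1 hpre
  simp only [List.nil_append] at h1 h2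
  simp [loopsplitter, h1, h2]
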